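-- pv_equiv track=rewrite | github.com/TachibanaKanade99/bds | bds_backend/bds/views.py | sortLstNumAndChar
-- ===== SOURCE A (Python) =====
-- def isNum(num):
--     try:
--         int(num)
--         return True
--     except ValueError:
--         return False
--
-- def sortLstNumAndChar(lst):
--     numbers = []
--     chars = []
--
--     for item in lst:
--         if isNum(item):
--             numbers.append(int(item))
--         else:
--             chars.append(item)
--
--     if numbers is not None and chars is not None:
--         numbers.sort(reverse=False)
--         chars.sort(reverse=False)
--         return list(map(str, numbers)) + chars
--     else:
--         return None
-- ===== SOURCE B (Python) =====
-- def isNum(num):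
--     try:
--         int(num)
--         return True
--     except ValueError:
--         return False
--
-- def sortLstNumAndChar(lst):
--     # One composite-key sort instead of partition + two sorts: numbers (by value)
--     # come before chars (lexicographic); homogeneous tuples so no int-vs-str compare.
--     ordered = sorted(lst, key=lambda x: (0, int(x), "") if isNum(x) else (1, 0, x))
--     return [str(int(x)) if isNum(x) else x for x in ordered]
-- ===== Notes on version B (the rewrite author's own statement) =====
-- stated objective: idiomatic
-- what changed: Replaced the partition-into-two-lists-then-two-sorts loop by a single sorted() call with a composite key (numbers by value before chars lexicographic) and one comprehension rendering each item.
import Mathlib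
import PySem

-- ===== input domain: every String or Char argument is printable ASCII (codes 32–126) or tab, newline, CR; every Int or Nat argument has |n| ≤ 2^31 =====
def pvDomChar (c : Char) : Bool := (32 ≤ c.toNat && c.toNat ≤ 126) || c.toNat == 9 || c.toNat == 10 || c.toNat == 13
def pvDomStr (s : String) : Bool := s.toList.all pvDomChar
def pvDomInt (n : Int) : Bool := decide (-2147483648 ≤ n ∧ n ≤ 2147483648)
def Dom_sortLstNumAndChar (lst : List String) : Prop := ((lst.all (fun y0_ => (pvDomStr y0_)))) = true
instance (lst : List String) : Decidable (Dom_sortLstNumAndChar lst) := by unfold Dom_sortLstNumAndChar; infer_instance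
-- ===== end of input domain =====

-- B replaces A's partition-into-two-lists-plus-two-sorts by one composite-key sort and one
-- rendering comprehension (idiomatic); return values proved equal on every input.

-- ===== PORT A =====
-- isNum(num): int() succeeds ⇔ ofStr? returns some (ValueError = none)
def isNum (num : String) : Bool := (PySem.Int.ofStr? num).isSome

-- int(item), used only where isNum already holds (getD 0 is never the parse of a non-number there)
def intval (s : String) : Int := (PySem.Int.ofStr? s).getD 0

def sortLstNumAndChar (lst : List String) : List String :=
  -- numbers = [], chars = []; for item in lst: append int(item) / item
  let nc : List Int × List String :=
    lst.foldl (fun s item =>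
      if isNum item then (s.1 ++ [intval item], s.2) else (s.1, s.2 ++ [item])) ([], [])
  -- 'numbers is not None and chars is not None' is always True in Python (lists are never None)
  (PySem.List.sorted nc.1 (fun x => x) false).map PySem.Int.toStr
    ++ PySem.List.sorted nc.2 (fun x => x) false

-- ===== PORT B =====
-- Source B's composite key '(0, int(x), "") if isNum(x) else (1, 0, x)' modelled as the
-- order-isomorphic Int ⊕ₗ String: numbers (compared by value) strictly before chars
-- (compared lexicographically) — exactly the order of those Python tuples.
def tagKey (x : String) : Int ⊕ String :=
  if isNum x then Sum.inl (intval x) else Sum.inr x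

def sortLstNumAndChar_alt (lst : List String) : List String :=
  (PySem.List.sorted lst (fun x => toLex (tagKey x)) false).map
    (fun x => if isNum x then PySem.Int.toStr (intval x) else x)

-- ===== PRECONDITION & SPEC =====
def Spec_sortLstNumAndChar (lst : List String) (out : List String) : Prop := out = sortLstNumAndChar_alt lst
instance (lst : List String) (out : List String) : Decidable (Spec_sortLstNumAndChar lst out) := by unfold Spec_sortLstNumAndChar; infer_instance

-- ===== CLAIM (what is proved, stated in full; the proofs are below) =====
def Claim_equal_sortLstNumAndChar : Prop := ∀ (lst : List String), Dom_sortLstNumAndChar lst → Spec_sortLstNumAndChar lst (sortLstNumAndChar lst)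

-- ===== LEMMAS AND PROOFS =====
-- render a tagged element back to its output string
def render : Int ⊕ String → String
  | Sum.inl n => PySem.Int.toStr n
  | Sum.inr s => s

-- A's loop is the pair (numbers, chars) = (map int (filter isNum), filter ¬isNum)
theorem foldl_partition (lst : List String) (n : List Int) (c : List String) :
    lst.foldl (fun s item =>
      if isNum item then (s.1 ++ [intval item], s.2) else (s.1, s.2 ++ [item])) (n, c)
    = (n ++ (lst.filter isNum).map intval, c ++ lst.filter (fun x => !isNum x)) := by
  induction lst generalizing n c with
  | nil => simp
  | cons x xs ih =>
    by_cases h : isNum x = true <;>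
      simp [List.foldl_cons, h, ih]

-- the sorted tagged list splits into sorted numbers followed by sorted chars
theorem tag_sorted_split (lst : List String) :
    (PySem.List.sorted lst (fun x => toLex (tagKey x)) false).map tagKey
    = ((PySem.List.sorted ((lst.filter isNum).map intval) (fun x => x) false).map Sum.inl)
      ++ ((PySem.List.sorted (lst.filter (fun x => !isNum x)) (fun x => x) false).map Sum.inr) := by
  apply PySem.List.eq_of_perm_of_pairwise_le_of_injective
    (key := fun v : Int ⊕ String => toLex v) toLex.injective
  · -- permutation: both sides are a rearrangement of map tagKey lst
    refine ((PySem.List.sorted_perm lst _ false).map tagKey).trans ?_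
    refine List.Perm.symm (List.Perm.trans ?_ ((List.filter_append_perm isNum lst).map tagKey))
    rw [List.map_append]
    refine List.Perm.append ?_ ?_
    · have h1 := ((PySem.List.sorted_perm ((lst.filter isNum).map intval) (fun x => x) false).map
        (Sum.inl : Int → Int ⊕ String))
      refine h1.trans ?_
      rw [List.map_map]
      refine List.Perm.of_eq ?_
      apply List.map_congr_left
      intro x hx
      have := List.of_mem_filter hx
      simp [tagKey, this]
    · have h1 := ((PySem.List.sorted_perm (lst.filter (fun x => !isNum x)) (fun x => x) false).map
        (Sum.inr : String → Int ⊕ String))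
      refine h1.trans ?_
      refine List.Perm.of_eq ?_
      apply List.map_congr_left
      intro x hx
      have := List.of_mem_filter hx
      simp at this
      simp [tagKey, this]
  · -- left side sorted by the key
    exact (PySem.List.sorted_pairwise lst (fun x => toLex (tagKey x))).map _ (fun _ _ h => h)
  · -- right side sorted by the key
    rw [List.pairwise_append]
    refine ⟨?_, ?_, ?_⟩
    · refine (PySem.List.sorted_pairwise ((lst.filter isNum).map intval) (fun x => x)).map _ ?_
      intro a b h
      simpa [Sum.Lex.inl_le_inl_iff] using h
    · refine (PySem.List.sorted_pairwise (lst.filter (fun x => !isNum x)) (fun x => x)).map _ ?_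
      intro a b h
      simpa [Sum.Lex.inr_le_inr_iff] using h
    · intro a ha b hb
      obtain ⟨n, _, rfl⟩ := List.mem_map.mp ha
      obtain ⟨s, _, rfl⟩ := List.mem_map.mp hb
      exact Sum.Lex.inl_le_inr n s

-- ===== VERDICT (by name: the statement is the Claim_ definition above) =====
theorem sortLstNumAndChar_spec : Claim_equal_sortLstNumAndChar := by
  intro lst _
  unfold Spec_sortLstNumAndChar sortLstNumAndChar sortLstNumAndChar_alt
  rw [foldl_partition]
  have hconv : (fun x => if isNum x then PySem.Int.toStr (intval x) else x)
      = fun x => render (tagKey x) := by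
    funext x
    by_cases h : isNum x = true <;> simp [tagKey, render, h]
  rw [hconv, show (PySem.List.sorted lst (fun x => toLex (tagKey x)) false).map
        (fun x => render (tagKey x))
      = ((PySem.List.sorted lst (fun x => toLex (tagKey x)) false).map tagKey).map render
    from by rw [List.map_map]; rfl,
    tag_sorted_split]
  simp [Function.comp_def, render]
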